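-- pv_equiv track=rewrite | github.com/ascaron180989/ershov_va_public | Поиск слова.py | max_count_word
-- ===== SOURCE A (Python) =====
-- def max_count_word(word_list: list) -> dict:
--     word_dict = {}
--     for word in word_list:
--         if len(word) < 3:
--             continue
--         else:
--             if word in word_dict:
--                 word_dict[word] += 1
--             else:
--                 word_dict[word] = 1
--     max_value = max(word_dict.values())
--     return {k: v for k, v in word_dict.items() if v == max_value}
-- ===== SOURCE B (Python) =====
-- def max_count_word(word_list: list) -> dict:
--     rest = [w for w in word_list if len(w) >= 3]
--     pairs = []
--     while rest:
--         w = rest[0]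
--         nxt = [x for x in rest if x != w]
--         pairs.append((w, len(rest) - len(nxt)))
--         rest = nxt
--     max_value = max(c for _, c in pairs)
--     return dict((w, c) for w, c in pairs if c == max_value)
-- ===== Notes on version B (the rewrite author's own statement) =====
-- stated objective: alternative
-- what changed: Replaces hash-dict accumulation by a worklist of repeated partitions: take the first remaining word, split the worklist into equal/unequal, record its count as the length difference, continue on the unequal part, then keep the max-tied pairs; no dictionary is built.
import Mathlib
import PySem

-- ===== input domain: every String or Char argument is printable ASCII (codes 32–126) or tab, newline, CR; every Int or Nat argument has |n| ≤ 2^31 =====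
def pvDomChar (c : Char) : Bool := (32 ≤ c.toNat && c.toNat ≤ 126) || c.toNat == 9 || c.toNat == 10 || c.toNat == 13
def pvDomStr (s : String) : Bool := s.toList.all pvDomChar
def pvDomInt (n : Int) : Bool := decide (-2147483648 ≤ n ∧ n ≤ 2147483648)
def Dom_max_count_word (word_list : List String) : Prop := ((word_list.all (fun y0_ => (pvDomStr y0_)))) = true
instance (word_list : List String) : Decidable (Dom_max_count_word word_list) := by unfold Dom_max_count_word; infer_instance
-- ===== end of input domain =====

-- B replaces A's hash-dict accumulation by a worklist of repeated partitions (count = length difference); same return value, no speed claim.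

-- ===== PORT A =====
-- The final dict comprehension iterates a dict with Nodup keys, so its items list is
-- exactly the filtered items list; ported as that filter (exact).
def max_count_word (word_list : List String) : List (String × Int) :=
  let word_dict := word_list.foldl (fun d word =>
    if PySem.Str.len word < 3 then d
    else if d.contains word then d.insert word (d.getD word 0 + 1)
    else d.insert word 1) PySem.Dict.empty
  match PySem.List.max? (PySem.Dict.values word_dict) (fun v => v) with
  | none => []  -- max() on an empty sequence raises ValueError: excluded by Pre_
  | some max_value => (PySem.Dict.items word_dict).filter (fun kv => kv.2 == max_value)

-- ===== PORT B =====
-- Source B's while-loop over the shrinking worklist 'rest', accumulating 'pairs' in order: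
-- ported as the equivalent structural recursion on 'rest' (the accumulator appends at the end).
def maxwTallyB (rest : List String) : List (String × Int) :=
  match rest with
  | [] => []
  | w :: t =>
    let nxt := (w :: t).filter (fun x => !(x == w))
    (w, ((w :: t).length : Int) - (nxt.length : Int)) :: maxwTallyB nxt
termination_by rest.length
decreasing_by
  simp only [List.filter_cons, beq_self_eq_true, Bool.not_true, List.length_cons]
  exact Nat.lt_succ_of_le (List.length_filter_le _ _)

-- dict((w, c) …) over Nodup keys is exactly the filtered pairs list (exact).
def max_count_word_alt (word_list : List String) : List (String × Int) :=
  let words := word_list.filter (fun w => decide (3 ≤ PySem.Str.len w))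
  let pairs := maxwTallyB words
  match PySem.List.max? (pairs.map (fun p => p.2)) (fun v => v) with
  | none => []  -- max() on an empty generator raises ValueError: excluded by Pre_
  | some max_value => pairs.filter (fun p => p.2 == max_value)

-- ===== PRECONDITION & SPEC =====
-- Pre_ excludes exactly the inputs with no word of length ≥ 3, where both A and B raise ValueError (max of an empty sequence).
def Pre_max_count_word (word_list : List String) : Prop :=
  ∃ w ∈ word_list, 3 ≤ PySem.Str.len w
instance (word_list : List String) : Decidable (Pre_max_count_word word_list) := by
  unfold Pre_max_count_word; infer_instance
def pvWitness_max_count_word : List String := (["abc", "de", "abc"])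

def Spec_max_count_word (word_list : List String) (out : List (String × Int)) : Prop := out = max_count_word_alt word_list
instance (word_list : List String) (out : List (String × Int)) : Decidable (Spec_max_count_word word_list out) := by unfold Spec_max_count_word; infer_instance

-- ===== CLAIM (what is proved, stated in full; the proofs are below) =====
def Claim_equal_max_count_word : Prop := ∀ (word_list : List String), Dom_max_count_word word_list → Pre_max_count_word word_list → Spec_max_count_word word_list (max_count_word word_list)

-- ===== LEMMAS AND PROOFS =====

-- A's guarded loop over word_list is the plain counting loop over the filtered list.
theorem foldA_eq_filter (l : List String) (d : PySem.Dict String Int) :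
    l.foldl (fun d word =>
      if PySem.Str.len word < 3 then d
      else if d.contains word then d.insert word (d.getD word 0 + 1)
      else d.insert word 1) d
    = (l.filter (fun w => decide (3 ≤ PySem.Str.len w))).foldl
        (fun d w => d.insert w (d.getD w 0 + 1)) d := by
  induction l generalizing d with
  | nil => rfl
  | cons x t ih =>
    simp only [List.foldl_cons, List.filter_cons]
    by_cases hx : PySem.Str.len x < 3
    · have hpx : ¬ ((decide (3 ≤ PySem.Str.len x)) = true) := by
        simp only [decide_eq_true_eq]; omega
      rw [if_pos hx, if_neg hpx]
      exact ih d
    · have hpx : (decide (3 ≤ PySem.Str.len x)) = true := by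
        simp only [decide_eq_true_eq]; omega
      rw [if_neg hx, if_pos hpx, List.foldl_cons]
      by_cases hc : d.contains x = true
      · rw [if_pos hc]
        exact ih _
      · have hc' : d.contains x = false := by simpa using hc
        rw [if_neg hc, PySem.Dict.getD_of_not_contains d 0 hc', zero_add]
        exact ih _

-- set-of-list commutes with filter (first occurrences survive filtering)
theorem ofList_filter {α : Type} [BEq α] [LawfulBEq α] (p : α → Bool) (l : List α) :
    PySem.Set.ofList (l.filter p) = (PySem.Set.ofList l).filter p := by
  induction l with
  | nil => rfl
  | cons x t ih =>
    rw [List.filter_cons]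
    by_cases hp : p x = true
    · rw [if_pos hp, PySem.Set.ofList_cons, PySem.Set.ofList_cons]
      simp only [PySem.Set.discard, ih, List.filter_cons, hp, if_pos, List.filter_filter]
      refine congrArg _ (List.filter_congr ?_)
      intro a _; exact Bool.and_comm _ _
    · have hp' : p x = false := by simpa using hp
      rw [if_neg hp, PySem.Set.ofList_cons]
      simp only [PySem.Set.discard, ih, List.filter_cons, hp', List.filter_filter]
      refine List.filter_congr ?_
      intro a _
      cases h : p a with
      | false => simp
      | true =>
        have hax : (a == x) = false := by
          refine Bool.eq_false_iff.mpr ?_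
          intro hax
          have : a = x := by simpa using hax
          rw [this, hp'] at h; exact Bool.false_ne_true h
        simp [hax]

-- the worklist tally is Counter(ws).items(): first occurrences in order, each with its count
theorem tallyB_eq_counter_items_aux (n : Nat) : ∀ (ws : List String), ws.length ≤ n →
    maxwTallyB ws = (PySem.Set.ofList ws).map (fun k => (k, (ws.count k : Int))) := by
  induction n with
  | zero =>
    intro ws h
    have : ws = [] := by cases ws with | nil => rfl | cons a t => simp at h
    subst this; rw [maxwTallyB]; rfl
  | succ n ih =>
    intro ws h
    match ws with
    | [] => rw [maxwTallyB]; rfl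
    | w :: t =>
      rw [maxwTallyB]
      show ((w, ((w :: t).length : Int) - (((w :: t).filter (fun x => !(x == w))).length : Int))
            :: maxwTallyB ((w :: t).filter (fun x => !(x == w)))) = _
      have hnxt : (w :: t).filter (fun x => !(x == w)) = t.filter (fun x => !(x == w)) := by
        simp
      rw [hnxt, PySem.Set.ofList_cons, List.map_cons]
      have hlen : (t.filter (fun x => !(x == w))).length + List.count w t = t.length := by
        rw [← List.countP_eq_length_filter, List.count]
        have := List.length_eq_countP_add_countP (p := fun x => x == w) (l := t)
        have hc : List.countP (fun a => decide ¬(a == w) = true) t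
            = List.countP (fun x => !(x == w)) t := by
          refine List.countP_congr ?_
          intro a _; simp
        omega
      refine congrArg₂ _ ?_ ?_
      · refine congrArg _ ?_
        rw [List.count_cons_self]
        simp only [List.length_cons]
        push_cast
        omega
      · have hle : (t.filter (fun x => !(x == w))).length ≤ n := by
          have := List.length_filter_le (fun x => !(x == w)) t
          simp only [List.length_cons] at h
          omega
        rw [ih _ hle, ofList_filter]
        simp only [PySem.Set.discard]
        refine List.map_congr_left ?_
        intro k hk
        have hkp : (!(k == w)) = true := (List.mem_filter.mp hk).2
        have hkw : k ≠ w := by simpa using hkp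
        have h1 : List.count k (t.filter (fun x => !(x == w))) = List.count k t :=
          List.count_filter (by simpa using hkw)
        have h2 : List.count k (w :: t) = List.count k t :=
          List.count_cons_of_ne (fun hwk => hkw hwk.symm)
        rw [h1, h2]

theorem tallyB_eq_counter_items (ws : List String) :
    maxwTallyB ws = (PySem.Set.ofList ws).map (fun k => (k, (ws.count k : Int))) :=
  tallyB_eq_counter_items_aux ws.length ws le_rfl

theorem max_count_word_eq_alt (word_list : List String)
    (_hpre : Pre_max_count_word word_list) :
    max_count_word word_list = max_count_word_alt word_list := by
  unfold max_count_word max_count_word_alt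
  rw [foldA_eq_filter, PySem.Dict.foldl_insert_getD_add_one_eq_counter]
  simp only [tallyB_eq_counter_items, PySem.Dict.values, PySem.Dict.items_counter,
    List.map_map, Function.comp_def]

-- ===== VERDICT (by name: the statement is the Claim_ definition above) =====
theorem max_count_word_spec : Claim_equal_max_count_word := by
  intro word_list _hdom hpre
  unfold Spec_max_count_word
  exact max_count_word_eq_alt word_list hpre
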